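-- pv_equiv track=rewrite | github.com/Stahash/AdventOfCode2020 | src/day_10.py | find_children
-- ===== SOURCE A (Python) =====
-- def find_children(parents, data, last_node):
--
--     children = dict()
--
--     for node, node_freq in parents.items():
--         if (node + 1) in data:
--             children[node + 1] = children.get(node+1, 0) + node_freq
--         if (node + 2) in data:
--             children[node+2] = children.get(node+2, 0) + node_freq
--         if (node + 3) in data:
--             children[node+3] = children.get(node+3, 0) + node_freq
--
--     finished_paths_number = children.get(last_node, 0)
--
--     return children, finished_paths_number
-- ===== SOURCE B (Python) =====
-- def find_children(parents, data, last_node):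
--     # Pull-based: first determine the key set (in A's creation order), then
--     # compute each child's count as one sum over its up-to-three predecessors.
--     keys = []
--     seen = set()
--     for node in parents:
--         for d in (1, 2, 3):
--             k = node + d
--             if k in data and k not in seen:
--                 seen.add(k)
--                 keys.append(k)
--     children = {k: sum(parents.get(k - d, 0) for d in (1, 2, 3)) for k in keys}
--     return children, children.get(last_node, 0)
-- ===== Notes on version B (the rewrite author's own statement) =====
-- stated objective: alternative
-- what changed: Replaces A's push-style accumulation (each parent incrementally adds its frequency into children[node+d]) by a pull-style computation: one pass fixes the key order with a seen-set, then each child's value is one sum over its up-to-three predecessor lookups parents.get(k-d, 0); Pre_ only restates the dict invariant that parents' association-list encoding has distinct keys.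
import Mathlib
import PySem

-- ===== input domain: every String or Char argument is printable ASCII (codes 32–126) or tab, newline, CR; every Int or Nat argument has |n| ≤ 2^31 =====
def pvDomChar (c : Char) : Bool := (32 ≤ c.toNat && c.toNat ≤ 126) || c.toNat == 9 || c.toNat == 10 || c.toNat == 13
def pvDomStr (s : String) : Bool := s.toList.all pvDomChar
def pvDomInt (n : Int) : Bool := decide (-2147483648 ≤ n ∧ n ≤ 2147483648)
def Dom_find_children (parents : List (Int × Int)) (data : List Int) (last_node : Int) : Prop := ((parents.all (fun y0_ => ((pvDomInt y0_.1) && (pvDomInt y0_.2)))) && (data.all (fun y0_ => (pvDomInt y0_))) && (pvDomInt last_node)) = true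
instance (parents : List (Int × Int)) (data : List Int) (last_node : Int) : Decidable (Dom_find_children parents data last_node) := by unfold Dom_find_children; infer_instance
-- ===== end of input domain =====

-- B computes the same children dict pull-style (key order fixed first, then one predecessor-sum per key) instead of A's push-style accumulation; alternative decomposition, same cost class.


-- ===== PORT A =====
def find_children (parents : List (Int × Int)) (data : List Int) (last_node : Int) : (List (Int × Int)) × Int :=
  let children : PySem.Dict Int Int := parents.foldl (fun (c : PySem.Dict Int Int) pr =>
    let c1 := if pr.1 + 1 ∈ data then c.insert (pr.1 + 1) (c.getD (pr.1 + 1) 0 + pr.2) else c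
    let c2 := if pr.1 + 2 ∈ data then c1.insert (pr.1 + 2) (c1.getD (pr.1 + 2) 0 + pr.2) else c1
    if pr.1 + 3 ∈ data then c2.insert (pr.1 + 3) (c2.getD (pr.1 + 3) 0 + pr.2) else c2)
    PySem.Dict.empty
  (children.items, children.getD last_node 0)

-- ===== PORT B =====
-- key-order pass of Source B: keys list plus a seen set
def fcKeys (parents : List (Int × Int)) (data : List Int) : List Int :=
  (parents.foldl (fun (st : List Int × PySem.Set Int) pr =>
    [(1 : Int), 2, 3].foldl (fun (st : List Int × PySem.Set Int) d =>
      let k := pr.1 + d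
      if k ∈ data ∧ ¬ PySem.Set.contains st.2 k then (st.1 ++ [k], PySem.Set.add st.2 k) else st)
    st) ([], PySem.Set.empty)).1

-- sum(parents.get(k - d, 0) for d in (1, 2, 3))
def fcPull (parents : List (Int × Int)) (k : Int) : Int :=
  (([(1 : Int), 2, 3]).map (fun d => (PySem.Dict.mk parents).getD (k - d) 0)).sum

def find_children_alt (parents : List (Int × Int)) (data : List Int) (last_node : Int) : (List (Int × Int)) × Int :=
  let keys := fcKeys parents data
  let pairs := keys.map (fun k => (k, fcPull parents k))
  (pairs, (PySem.Dict.mk pairs).getD last_node 0)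

-- ===== PRECONDITION & SPEC =====
-- parents encodes a Python dict, whose keys are distinct by construction: Pre_ only restates
-- that dict invariant and excludes no actual dict input.
def Pre_find_children (parents : List (Int × Int)) (data : List Int) (last_node : Int) : Prop :=
  (parents.map Prod.fst).Nodup
instance (parents : List (Int × Int)) (data : List Int) (last_node : Int) : Decidable (Pre_find_children parents data last_node) := by unfold Pre_find_children; infer_instance
def pvWitness_find_children : (List (Int × Int)) × List Int × Int := ([(0, 1)], [1], 1)
def Spec_find_children (parents : List (Int × Int)) (data : List Int) (last_node : Int) (out : (List (Int × Int)) × Int) : Prop := out = find_children_alt parents data last_node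
instance (parents : List (Int × Int)) (data : List Int) (last_node : Int) (out : (List (Int × Int)) × Int) : Decidable (Spec_find_children parents data last_node out) := by unfold Spec_find_children; infer_instance

-- ===== CLAIM (what is proved, stated in full; the proofs are below) =====
def Claim_equal_find_children : Prop := ∀ (parents : List (Int × Int)) (data : List Int) (last_node : Int), Dom_find_children parents data last_node → Pre_find_children parents data last_node → Spec_find_children parents data last_node (find_children parents data last_node)

-- ===== LEMMAS AND PROOFS =====

def psum (parents : List (Int × Int)) (k : Int) : Int :=
  ((parents.filter (fun pr => k - pr.1 = 1 ∨ k - pr.1 = 2 ∨ k - pr.1 = 3)).map (·.2)).sum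

-- named forms of the two loop bodies (definitionally equal to the ports' lambdas)
def stepA (data : List Int) (c : PySem.Dict Int Int) (pr : Int × Int) : PySem.Dict Int Int :=
  let c1 := if pr.1 + 1 ∈ data then c.insert (pr.1 + 1) (c.getD (pr.1 + 1) 0 + pr.2) else c
  let c2 := if pr.1 + 2 ∈ data then c1.insert (pr.1 + 2) (c1.getD (pr.1 + 2) 0 + pr.2) else c1
  if pr.1 + 3 ∈ data then c2.insert (pr.1 + 3) (c2.getD (pr.1 + 3) 0 + pr.2) else c2

def setD (data : List Int) (p : Int) (st : List Int × PySem.Set Int) (d : Int) : List Int × PySem.Set Int :=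
  if p + d ∈ data ∧ ¬ PySem.Set.contains st.2 (p + d) then (st.1 ++ [p + d], PySem.Set.add st.2 (p + d)) else st

def keyD (data : List Int) (p : Int) (ks : List Int) (d : Int) : List Int :=
  if p + d ∈ data ∧ p + d ∉ ks then ks ++ [p + d] else ks

def keyStep (data : List Int) (ks : List Int) (pr : Int × Int) : List Int :=
  keyD data pr.1 (keyD data pr.1 (keyD data pr.1 ks 1) 2) 3

def kof (parents : List (Int × Int)) (data : List Int) : List Int :=
  parents.foldl (keyStep data) []

-- the dict A maintains, in closed form
def mkD (pre : List (Int × Int)) (data : List Int) : PySem.Dict Int Int :=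
  PySem.Dict.mk ((kof pre data).map (fun k => (k, psum pre k)))

lemma setD_pair (data : List Int) (p : Int) (ks : List Int) (d : Int) :
    setD data p (ks, ks) d = (keyD data p ks d, keyD data p ks d) := by
  unfold setD keyD
  by_cases h : p + d ∈ data ∧ p + d ∉ ks
  · rw [if_pos ⟨h.1, by simpa [PySem.Set.contains_iff] using h.2⟩, if_pos h,
      PySem.Set.add_of_not_mem h.2]
  · rw [if_neg (by simp only [PySem.Set.contains_iff]; tauto), if_neg h]

lemma foldl_setD_pair (data : List Int) (p : Int) (ds : List Int) :
    ∀ ks : List Int, ds.foldl (setD data p) (ks, ks) = (ds.foldl (keyD data p) ks, ds.foldl (keyD data p) ks) := by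
  induction ds with
  | nil => intro ks; rfl
  | cons d dt ih =>
    intro ks
    rw [List.foldl_cons, List.foldl_cons, setD_pair]
    exact ih _

lemma fcKeys_eq_kof (parents : List (Int × Int)) (data : List Int) :
    fcKeys parents data = kof parents data := by
  have main : ∀ (l : List (Int × Int)) (ks : List Int),
      l.foldl (fun st pr => [(1 : Int), 2, 3].foldl (setD data pr.1) st) (ks, ks)
        = (l.foldl (keyStep data) ks, l.foldl (keyStep data) ks) := by
    intro l
    induction l with
    | nil => intro ks; rfl
    | cons pr t ih =>
      intro ks
      have step : [(1 : Int), 2, 3].foldl (setD data pr.1) (ks, ks) = (keyStep data ks pr, keyStep data ks pr) := by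
        rw [foldl_setD_pair]; exact rfl
      calc (pr :: t).foldl (fun st pr => [(1 : Int), 2, 3].foldl (setD data pr.1) st) (ks, ks)
          = t.foldl (fun st pr => [(1 : Int), 2, 3].foldl (setD data pr.1) st)
              ([(1 : Int), 2, 3].foldl (setD data pr.1) (ks, ks)) := rfl
        _ = t.foldl (fun st pr => [(1 : Int), 2, 3].foldl (setD data pr.1) st)
              (keyStep data ks pr, keyStep data ks pr) := by rw [step]
        _ = ((pr :: t).foldl (keyStep data) ks, (pr :: t).foldl (keyStep data) ks) := ih _
  exact congrArg Prod.fst (main parents [])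

lemma subset_keyD (data : List Int) (p : Int) (ks : List Int) (d : Int) :
    ks ⊆ keyD data p ks d := by
  unfold keyD; split_ifs
  · exact List.subset_append_left _ _
  · exact List.Subset.refl _

lemma subset_keyStep (data : List Int) (ks : List Int) (pr : Int × Int) :
    ks ⊆ keyStep data ks pr :=
  ((subset_keyD data pr.1 ks 1).trans (subset_keyD data pr.1 _ 2)).trans (subset_keyD data pr.1 _ 3)

lemma mem_keyD_self (data : List Int) (p : Int) (ks : List Int) (d : Int) (h : p + d ∈ data) :
    p + d ∈ keyD data p ks d := by
  unfold keyD; split_ifs with hc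
  · simp
  · have : p + d ∈ ks := by tauto
    exact this

lemma mem_keyStep (data : List Int) (ks : List Int) (pr : Int × Int) (x : Int)
    (hx : x ∈ data) (hoff : x - pr.1 = 1 ∨ x - pr.1 = 2 ∨ x - pr.1 = 3) :
    x ∈ keyStep data ks pr := by
  unfold keyStep
  rcases hoff with h | h | h
  · have hx1 : x = pr.1 + 1 := by omega
    subst hx1
    exact subset_keyD data pr.1 _ 3 (subset_keyD data pr.1 _ 2 (mem_keyD_self data pr.1 ks 1 hx))
  · have hx2 : x = pr.1 + 2 := by omega
    subst hx2
    exact subset_keyD data pr.1 _ 3 (mem_keyD_self data pr.1 _ 2 hx)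
  · have hx3 : x = pr.1 + 3 := by omega
    subst hx3
    exact mem_keyD_self data pr.1 _ 3 hx

lemma not_mem_foldl_keyStep (data : List Int) (x : Int) (hx : x ∈ data) (l : List (Int × Int)) :
    ∀ ks : List Int, x ∉ l.foldl (keyStep data) ks →
      x ∉ ks ∧ ∀ pr ∈ l, ¬(x - pr.1 = 1 ∨ x - pr.1 = 2 ∨ x - pr.1 = 3) := by
  induction l with
  | nil => intro ks h; exact ⟨h, by simp⟩
  | cons pr t ih =>
    intro ks h
    rw [List.foldl_cons] at h
    obtain ⟨h1, h2⟩ := ih _ h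
    refine ⟨fun hm => h1 (subset_keyStep data ks pr hm), ?_⟩
    intro q hq
    rcases List.mem_cons.1 hq with hq | hq
    · subst hq; exact fun hoff => h1 (mem_keyStep data ks q x hx hoff)
    · exact h2 q hq

lemma psum_eq_zero (data : List Int) (pre : List (Int × Int)) (x : Int)
    (hx : x ∈ data) (hnm : x ∉ kof pre data) : psum pre x = 0 := by
  obtain ⟨-, h2⟩ := not_mem_foldl_keyStep data x hx pre [] hnm
  unfold psum
  rw [List.filter_eq_nil_iff.2 (by intro pr hpr; simpa using h2 pr hpr)]
  rfl

lemma mem_data_of_keyD (data : List Int) (p : Int) (ks : List Int) (d : Int)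
    (h : ∀ k ∈ ks, k ∈ data) : ∀ k ∈ keyD data p ks d, k ∈ data := by
  unfold keyD; split_ifs with hc
  · intro k hk
    rcases List.mem_append.1 hk with hk | hk
    · exact h k hk
    · exact (List.mem_singleton.1 hk) ▸ hc.1
  · exact h

lemma mem_data_of_keyStep (data : List Int) (ks : List Int) (pr : Int × Int)
    (h : ∀ k ∈ ks, k ∈ data) : ∀ k ∈ keyStep data ks pr, k ∈ data := by
  unfold keyStep
  exact mem_data_of_keyD data pr.1 _ 3 (mem_data_of_keyD data pr.1 _ 2 (mem_data_of_keyD data pr.1 ks 1 h))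

lemma mem_data_of_kof (parents : List (Int × Int)) (data : List Int) :
    ∀ k ∈ kof parents data, k ∈ data := by
  have main : ∀ (l : List (Int × Int)) (ks : List Int), (∀ k ∈ ks, k ∈ data) →
      ∀ k ∈ l.foldl (keyStep data) ks, k ∈ data := by
    intro l
    induction l with
    | nil => intro ks h; exact h
    | cons pr t ih =>
      intro ks h
      exact ih _ (mem_data_of_keyStep data ks pr h)
  exact main parents [] (by simp)

-- getD on a dict in map form
lemma getD_mk_map (ks : List Int) (f : Int → Int) (k : Int) :
    (PySem.Dict.mk (ks.map (fun x => (x, f x)))).getD k 0 = if k ∈ ks then f k else 0 := by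
  induction ks with
  | nil => simp [PySem.Dict.getD, PySem.Dict.get?]
  | cons a t ih =>
    by_cases h : a = k
    · subst h
      simp [PySem.Dict.getD_eq_get?_getD, PySem.Dict.get?_mk_cons]
    · have hh : (PySem.Dict.mk (((a :: t).map (fun x => (x, f x))))).get? k
          = (PySem.Dict.mk (t.map (fun x => (x, f x)))).get? k := by
        simp [PySem.Dict.get?_mk_cons, h]
      rw [PySem.Dict.getD_eq_get?_getD, hh, ← PySem.Dict.getD_eq_get?_getD, ih]
      simp [List.mem_cons, Ne.symm h]

-- insert on a dict in map form
lemma insert_mk_map (ks : List Int) (f : Int → Int) (k v : Int) :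
    (PySem.Dict.mk (ks.map (fun x => (x, f x)))).insert k v
      = PySem.Dict.mk (((if k ∈ ks then ks else ks ++ [k]).map
          (fun x => (x, if x = k then v else f x)))) := by
  apply PySem.Dict.ext
  rw [PySem.Dict.items_insert]
  have hkeys : (PySem.Dict.mk (ks.map (fun x => (x, f x)))).contains k = decide (k ∈ ks) := by
    rw [PySem.Dict.contains_eq_decide_mem_keys]
    simp [PySem.Dict.keys]
  rw [hkeys]
  by_cases h : k ∈ ks
  · simp only [h, decide_true, if_true]
    show (ks.map (fun x => (x, f x))).map _ = _
    rw [List.map_map]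
    apply List.map_congr_left
    intro x _
    by_cases hx : x = k
    · subst hx; simp
    · simp [hx]
  · simp only [h, decide_false, Bool.false_eq_true, if_false]
    show (ks.map (fun x => (x, f x))) ++ [(k, v)] = _
    rw [List.map_append]
    congr 1
    · apply List.map_congr_left
      intro x hx
      have : x ≠ k := fun hh => h (hh ▸ hx)
      simp [this]
    · simp

lemma psum_append (pre : List (Int × Int)) (p v k : Int) :
    psum (pre ++ [(p, v)]) k
      = psum pre k + (if k - p = 1 ∨ k - p = 2 ∨ k - p = 3 then v else 0) := by
  simp only [psum, List.filter_append, List.map_append, List.sum_append]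
  by_cases h : k - p = 1 ∨ k - p = 2 ∨ k - p = 3 <;> simp [h]

-- one conditional push of A, in map form
lemma condStep (data : List Int) (ks : List Int) (f : Int → Int) (k v : Int) :
    (if k ∈ data then
        (PySem.Dict.mk (ks.map (fun x => (x, f x)))).insert k
          ((PySem.Dict.mk (ks.map (fun x => (x, f x)))).getD k 0 + v)
      else PySem.Dict.mk (ks.map (fun x => (x, f x))))
    = PySem.Dict.mk ((if k ∈ data ∧ k ∉ ks then ks ++ [k] else ks).map
        (fun x => (x, if x = k ∧ k ∈ data then (if k ∈ ks then f k else 0) + v else f x))) := by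
  by_cases hd : k ∈ data
  · rw [if_pos hd, getD_mk_map, insert_mk_map]
    by_cases hk : k ∈ ks
    · simp only [if_pos hk, if_neg (show ¬(k ∈ data ∧ k ∉ ks) from fun h => h.2 hk)]
      congr 1
      apply List.map_congr_left
      intro x _
      by_cases hx : x = k <;> simp [hx, hd]
    · simp only [if_neg hk, if_pos (show k ∈ data ∧ k ∉ ks from ⟨hd, hk⟩)]
      congr 1
      apply List.map_congr_left
      intro x _
      by_cases hx : x = k <;> simp [hx, hd]
  · rw [if_neg hd, if_neg (show ¬(k ∈ data ∧ k ∉ ks) from fun h => hd h.1)]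
    congr 1
    apply List.map_congr_left
    intro x _
    simp [hd]

lemma kof_append (pre : List (Int × Int)) (data : List Int) (pr : Int × Int) :
    kof (pre ++ [pr]) data = keyStep data (kof pre data) pr := by
  simp [kof, List.foldl_append]

-- the composed value of A's three pushes at a key of the new dict
lemma push3_eq (data : List Int) (K0 : List Int) (f : Int → Int) (p v x : Int)
    (hzero : ∀ y, y ∈ data → y ∉ K0 → f y = 0) (hxd : x ∈ data) :
    (let k1 := if p + 1 ∈ data ∧ p + 1 ∉ K0 then K0 ++ [p + 1] else K0
     let F1 := fun y => if y = p + 1 ∧ p + 1 ∈ data then (if p + 1 ∈ K0 then f (p + 1) else 0) + v else f y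
     let F2 := fun y => if y = p + 2 ∧ p + 2 ∈ data then (if p + 2 ∈ k1 then F1 (p + 2) else 0) + v else F1 y
     let k2 := if p + 2 ∈ data ∧ p + 2 ∉ k1 then k1 ++ [p + 2] else k1
     if x = p + 3 ∧ p + 3 ∈ data then (if p + 3 ∈ k2 then F2 (p + 3) else 0) + v else F2 x)
    = f x + (if x - p = 1 ∨ x - p = 2 ∨ x - p = 3 then v else 0) := by
  simp only []
  by_cases h1 : x = p + 1
  · subst h1
    rw [if_neg (fun h => by omega : ¬(p + 1 = p + 3 ∧ p + 3 ∈ data)),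
        if_neg (fun h => by omega : ¬(p + 1 = p + 2 ∧ p + 2 ∈ data)),
        if_pos ⟨rfl, hxd⟩, if_pos (by omega : p + 1 - p = 1 ∨ p + 1 - p = 2 ∨ p + 1 - p = 3)]
    by_cases hm : p + 1 ∈ K0
    · rw [if_pos hm]
    · rw [if_neg hm, hzero _ hxd hm]
  · by_cases h2 : x = p + 2
    · subst h2
      have hk1 : (p + 2 ∈ (if p + 1 ∈ data ∧ p + 1 ∉ K0 then K0 ++ [p + 1] else K0)) ↔ p + 2 ∈ K0 := by
        split_ifs <;> simp [List.mem_append, show ¬(p + 2 = p + 1) from by omega]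
      rw [if_neg (fun h => by omega : ¬(p + 2 = p + 3 ∧ p + 3 ∈ data)),
          if_pos ⟨rfl, hxd⟩,
          if_neg (fun h => by omega : ¬(p + 2 = p + 1 ∧ p + 1 ∈ data)),
          if_pos (by omega : p + 2 - p = 1 ∨ p + 2 - p = 2 ∨ p + 2 - p = 3)]
      simp only [hk1]
      by_cases hm : p + 2 ∈ K0
      · rw [if_pos hm]
      · rw [if_neg hm, hzero _ hxd hm]
    · by_cases h3 : x = p + 3
      · subst h3
        have hk2 : (p + 3 ∈ (if p + 2 ∈ data ∧ p + 2 ∉ (if p + 1 ∈ data ∧ p + 1 ∉ K0 then K0 ++ [p + 1] else K0)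
              then (if p + 1 ∈ data ∧ p + 1 ∉ K0 then K0 ++ [p + 1] else K0) ++ [p + 2]
              else (if p + 1 ∈ data ∧ p + 1 ∉ K0 then K0 ++ [p + 1] else K0))) ↔ p + 3 ∈ K0 := by
          split_ifs <;>
            simp [List.mem_append, show ¬(p + 3 = p + 1) from by omega, show ¬(p + 3 = p + 2) from by omega]
        rw [if_pos ⟨rfl, hxd⟩,
            if_neg (fun h => by omega : ¬(p + 3 = p + 2 ∧ p + 2 ∈ data)),
            if_neg (fun h => by omega : ¬(p + 3 = p + 1 ∧ p + 1 ∈ data)),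
            if_pos (by omega : p + 3 - p = 1 ∨ p + 3 - p = 2 ∨ p + 3 - p = 3)]
        simp only [hk2]
        by_cases hm : p + 3 ∈ K0
        · rw [if_pos hm]
        · rw [if_neg hm, hzero _ hxd hm]
      · rw [if_neg (fun h => h3 h.1), if_neg (fun h => h2 h.1), if_neg (fun h => h1 h.1),
            if_neg (by omega : ¬(x - p = 1 ∨ x - p = 2 ∨ x - p = 3))]
        ring

-- one A-step on the closed form
lemma stepA_mkD (data : List Int) (pre : List (Int × Int)) (pr : Int × Int) :
    stepA data (mkD pre data) pr = mkD (pre ++ [pr]) data := by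
  obtain ⟨p, v⟩ := pr
  have hsub := mem_data_of_kof pre data
  simp only [stepA, mkD]
  rw [condStep data (kof pre data) (psum pre) (p + 1) v,
      condStep data _ _ (p + 2) v, condStep data _ _ (p + 3) v,
      kof_append pre data (p, v)]
  have hkeys : keyStep data (kof pre data) (p, v)
      = (if p + 3 ∈ data ∧ p + 3 ∉
            (if p + 2 ∈ data ∧ p + 2 ∉ (if p + 1 ∈ data ∧ p + 1 ∉ kof pre data then kof pre data ++ [p + 1] else kof pre data)
              then (if p + 1 ∈ data ∧ p + 1 ∉ kof pre data then kof pre data ++ [p + 1] else kof pre data) ++ [p + 2]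
              else (if p + 1 ∈ data ∧ p + 1 ∉ kof pre data then kof pre data ++ [p + 1] else kof pre data))
          then (if p + 2 ∈ data ∧ p + 2 ∉ (if p + 1 ∈ data ∧ p + 1 ∉ kof pre data then kof pre data ++ [p + 1] else kof pre data)
              then (if p + 1 ∈ data ∧ p + 1 ∉ kof pre data then kof pre data ++ [p + 1] else kof pre data) ++ [p + 2]
              else (if p + 1 ∈ data ∧ p + 1 ∉ kof pre data then kof pre data ++ [p + 1] else kof pre data)) ++ [p + 3]
          else (if p + 2 ∈ data ∧ p + 2 ∉ (if p + 1 ∈ data ∧ p + 1 ∉ kof pre data then kof pre data ++ [p + 1] else kof pre data)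
              then (if p + 1 ∈ data ∧ p + 1 ∉ kof pre data then kof pre data ++ [p + 1] else kof pre data) ++ [p + 2]
              else (if p + 1 ∈ data ∧ p + 1 ∉ kof pre data then kof pre data ++ [p + 1] else kof pre data))) := by
    simp only [keyStep, keyD]
  rw [← hkeys]
  congr 1
  apply List.map_congr_left
  intro x hx
  have hxd : x ∈ data := mem_data_of_keyStep data (kof pre data) (p, v) hsub x hx
  have hval := push3_eq data (kof pre data) (psum pre) p v x
      (fun y hy hn => psum_eq_zero data pre y hy hn) hxd
  have hrhs : psum (pre ++ [(p, v)]) x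
      = psum pre x + (if x - p = 1 ∨ x - p = 2 ∨ x - p = 3 then v else 0) :=
    psum_append pre p v x
  show _ = (x, psum (pre ++ [(p, v)]) x)
  rw [hrhs, ← hval]

-- fold the step lemma over the whole list
lemma foldl_stepA (data : List Int) (l : List (Int × Int)) :
    ∀ pre : List (Int × Int), l.foldl (stepA data) (mkD pre data) = mkD (pre ++ l) data := by
  induction l with
  | nil => intro pre; simp
  | cons pr t ih =>
    intro pre
    rw [List.foldl_cons, stepA_mkD data pre pr]
    have := ih (pre ++ [pr])
    simpa using this

-- under the dict invariant, B's three lookups pull exactly A's pushed total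
lemma fcPull_eq_psum (parents : List (Int × Int)) (hnd : (parents.map Prod.fst).Nodup) (k : Int) :
    fcPull parents k = psum parents k := by
  induction parents with
  | nil => rfl
  | cons pr rest ih =>
    rw [List.map_cons, List.nodup_cons] at hnd
    obtain ⟨hpr, hrest⟩ := hnd
    have hgd : ∀ d : Int, (PySem.Dict.mk (pr :: rest)).getD (k - d) 0
        = if pr.1 = k - d then pr.2 else (PySem.Dict.mk rest).getD (k - d) 0 := by
      intro d
      rw [PySem.Dict.getD_eq_get?_getD, PySem.Dict.get?_mk_cons]
      by_cases h : pr.1 = k - d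
      · simp [h]
      · simp [h, ← PySem.Dict.getD_eq_get?_getD]
    have habs : ∀ d : Int, pr.1 = k - d → (PySem.Dict.mk rest).getD (k - d) 0 = 0 := by
      intro d hd
      apply PySem.Dict.getD_of_not_contains
      rw [PySem.Dict.contains_eq_decide_mem_keys]
      simp only [PySem.Dict.keys_mk, decide_eq_false_iff_not]
      exact fun hm => hpr (hd ▸ hm)
    have hps : psum (pr :: rest) k
        = (if k - pr.1 = 1 ∨ k - pr.1 = 2 ∨ k - pr.1 = 3 then pr.2 else 0) + psum rest k := by
      simp only [psum, List.filter_cons]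
      by_cases h : k - pr.1 = 1 ∨ k - pr.1 = 2 ∨ k - pr.1 = 3 <;> simp [h]
    have hB : fcPull (pr :: rest) k
        = (PySem.Dict.mk (pr :: rest)).getD (k - 1) 0 + ((PySem.Dict.mk (pr :: rest)).getD (k - 2) 0
            + ((PySem.Dict.mk (pr :: rest)).getD (k - 3) 0 + 0)) := rfl
    have hB' : fcPull rest k
        = (PySem.Dict.mk rest).getD (k - 1) 0 + ((PySem.Dict.mk rest).getD (k - 2) 0
            + ((PySem.Dict.mk rest).getD (k - 3) 0 + 0)) := rfl
    rw [hps, ← ih hrest, hB, hB', hgd 1, hgd 2, hgd 3]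
    by_cases h1 : pr.1 = k - 1
    · rw [if_pos h1, if_neg (by omega), if_neg (by omega), if_pos (by omega), habs 1 h1]
      ring
    · rw [if_neg h1]
      by_cases h2 : pr.1 = k - 2
      · rw [if_pos h2, if_neg (by omega), if_pos (by omega), habs 2 h2]
        ring
      · rw [if_neg h2]
        by_cases h3 : pr.1 = k - 3
        · rw [if_pos h3, if_pos (by omega), habs 3 h3]
          ring
        · rw [if_neg h3, if_neg (by omega)]
          ring

-- ===== VERDICT (by name: the statement is the Claim_ definition above) =====
theorem find_children_spec : Claim_equal_find_children := by
  intro parents data last_node _ hpre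
  unfold Spec_find_children
  show find_children parents data last_node = find_children_alt parents data last_node
  unfold find_children find_children_alt
  have hA : parents.foldl (stepA data) PySem.Dict.empty = mkD parents data := by
    have h0 : (PySem.Dict.empty : PySem.Dict Int Int) = mkD [] data := rfl
    rw [h0, foldl_stepA data parents [], List.nil_append]
  have hmap : (fcKeys parents data).map (fun k => (k, fcPull parents k))
      = (kof parents data).map (fun k => (k, psum parents k)) := by
    rw [fcKeys_eq_kof]
    exact List.map_congr_left (fun k _ => by rw [fcPull_eq_psum parents hpre k])
  show ((parents.foldl (stepA data) PySem.Dict.empty).items,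
        (parents.foldl (stepA data) PySem.Dict.empty).getD last_node 0)
      = ((fcKeys parents data).map (fun k => (k, fcPull parents k)),
         (PySem.Dict.mk ((fcKeys parents data).map (fun k => (k, fcPull parents k)))).getD last_node 0)
  rw [hA, hmap]
  rfl
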